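-- pv_equiv track=rewrite | github.com/Kitri/AdventOfCode2021 | 2021/Day16.py | compute_literal_value
-- ===== SOURCE A (Python) =====
-- def compute_literal_value(binstr):
--     num = ''
--     counter = 0
--     for i in range(0, len(binstr), 5):
--         counter += 1
--         group = binstr[i:i+5]
--         num += group[1:]
--         if(group[0] == '0'):
--             break
--     return (counter, num)
-- ===== SOURCE B (Python) =====
-- def compute_literal_value(binstr):
--     flags = binstr[0::5]
--     stop = flags.find('0')
--     count = stop + 1 if stop != -1 else len(flags)
--     payload = ''.join(binstr[5 * k + 1:5 * k + 5] for k in range(count))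
--     return (count, payload)
-- ===== Notes on version B (the rewrite author's own statement) =====
-- stated objective: alternative
-- what changed: Replaced the flat flag-testing stride-5 loop with string accumulation by a loop-free decomposition: stride-slice the continuation flags binstr[0::5], cut them at the first zero flag via str.find, and join the 4-bit payload slices for the resulting group count.
import Mathlib
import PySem

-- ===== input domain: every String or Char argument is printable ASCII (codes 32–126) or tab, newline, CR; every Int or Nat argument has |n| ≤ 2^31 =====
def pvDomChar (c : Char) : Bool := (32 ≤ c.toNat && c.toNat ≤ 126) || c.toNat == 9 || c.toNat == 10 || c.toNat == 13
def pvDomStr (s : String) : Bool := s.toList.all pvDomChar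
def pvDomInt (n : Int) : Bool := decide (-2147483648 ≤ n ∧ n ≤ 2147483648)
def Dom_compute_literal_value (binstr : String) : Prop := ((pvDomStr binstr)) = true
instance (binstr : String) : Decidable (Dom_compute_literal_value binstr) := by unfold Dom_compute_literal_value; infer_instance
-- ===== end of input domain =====

-- B replaces A's fused flag-testing loop by stride slicing: the continuation flags binstr[0::5] are cut at the
-- first zero flag via find, and the payload is a join of 4-bit slices (alternative decomposition, no per-group test loop).


-- ===== PORT A =====
-- the for-loop over range(0, len(binstr), 5) with state (counter, num) and a break
def pvALoop (s : List Char) : List Int → Int → List Char → Int × List Char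
  | [], counter, num => (counter, num)
  | i :: rest, counter, num =>
    let counter := counter + 1
    let group := PySem.List.slice s (some i) (some (i + 5))
    let num := num ++ PySem.List.slice group (some 1) none
    if PySem.List.pyGet? group 0 = some '0' then (counter, num)
    else pvALoop s rest counter num

def compute_literal_value (binstr : String) : Int × String :=
  let s := binstr.toList
  let r := pvALoop s (PySem.List.pyRange 0 (s.length : Int) 5) 0 []
  (r.1, String.ofList r.2)

-- ===== PORT B =====
-- Source B: flags = binstr[0::5]; stop = flags.find('0'); count = stop+1 if stop != -1 else len(flags);
--       payload = ''.join(binstr[5*k+1:5*k+5] for k in range(count))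
-- binstr[0::5] is slice? with step 5; the step is the constant 5 ≠ 0, so slice? is always `some` (.getD [] only
-- discharges the Option, it is never the default)
def compute_literal_value_alt (binstr : String) : Int × String :=
  let s := binstr.toList
  let flags := (PySem.List.slice? s (some 0) none 5).getD []
  let stop := PySem.Chars.find flags ['0']
  let count := if stop ≠ -1 then stop + 1 else (flags.length : Int)
  let payload := (List.map
    (fun k => PySem.List.slice s (some (5 * k + 1)) (some (5 * k + 5)))
    (PySem.List.pyRange 0 count 1)).flatten
  (count, String.ofList payload)

-- ===== PRECONDITION & SPEC =====
def Spec_compute_literal_value (binstr : String) (out : Int × String) : Prop := out = compute_literal_value_alt binstr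
instance (binstr : String) (out : Int × String) : Decidable (Spec_compute_literal_value binstr out) := by unfold Spec_compute_literal_value; infer_instance

-- ===== CLAIM (what is proved, stated in full; the proofs are below) =====
def Claim_equal_compute_literal_value : Prop := ∀ (binstr : String), Dom_compute_literal_value binstr → Spec_compute_literal_value binstr (compute_literal_value binstr)

-- ===== LEMMAS AND PROOFS =====

-- shared recursive yardstick: both ports are proved equal to this 5-bit-group recursion
def pvBRec (s : List Char) : Int × List Char :=
  if _h : s = [] then (0, [])
  else
    let group := PySem.List.slice s none (some 5)
    if PySem.List.pyGet? group 0 = some '0' then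
      (1, PySem.List.slice group (some 1) none)
    else
      let r := pvBRec (PySem.List.slice s (some 5) none)
      (r.1 + 1, PySem.List.slice group (some 1) none ++ r.2)
termination_by s.length
decreasing_by
  rw [PySem.List.slice_from s (by norm_num : (0:Int) ≤ 5)]
  simp only [List.length_drop]
  have : s.length ≠ 0 := fun h0 => _h (List.eq_nil_of_length_eq_zero h0)
  omega

lemma pyRange5_cons (a b : Int) (h : a < b) :
    PySem.List.pyRange a b 5 = a :: PySem.List.pyRange (a + 5) b 5 := by
  rw [PySem.List.pyRange_of_pos a b (by norm_num), PySem.List.pyRange_of_pos (a+5) b (by norm_num)]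
  have hcount : (if a < b then ((b - a + 5 - 1) / 5).toNat else 0)
      = (if a + 5 < b then ((b - (a+5) + 5 - 1) / 5).toNat else 0) + 1 := by
    split_ifs <;> omega
  rw [hcount, List.range_succ_eq_map, List.map_cons, List.map_map]
  congr 1
  · push_cast; ring
  · refine List.map_congr_left fun k _ => ?_
    simp only [Function.comp_apply]
    push_cast
    ring

lemma pyRange5_nil (a b : Int) (h : b ≤ a) : PySem.List.pyRange a b 5 = [] := by
  rw [PySem.List.pyRange_of_pos a b (by norm_num)]
  simp [not_lt.mpr h]

lemma toNat5 : (5:Int).toNat = 5 := rfl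

lemma take5_eq (t : List Char) : PySem.List.slice t none (some 5) = t.take 5 := by
  rw [PySem.List.slice_to t (by norm_num : (0:Int) ≤ 5), toNat5]

lemma drop5_eq (t : List Char) : PySem.List.slice t (some 5) none = t.drop 5 := by
  rw [PySem.List.slice_from t (by norm_num : (0:Int) ≤ 5), toNat5]

-- A's remaining loop from offset pre.length over pre ++ t is the group recursion on t,
-- folded onto the accumulators
lemma loop_eq_rec :
    ∀ n (t pre : List Char), t.length ≤ n → ∀ (counter : Int) (num : List Char),
      pvALoop (pre ++ t)
          (PySem.List.pyRange (pre.length : Int) ((pre.length : Int) + (t.length : Int)) 5)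
          counter num
        = (counter + (pvBRec t).1, num ++ (pvBRec t).2) := by
  intro n
  induction n with
  | zero =>
      intro t pre ht counter num
      have ht0 : t = [] := List.eq_nil_of_length_eq_zero (Nat.le_zero.mp ht)
      subst ht0
      rw [pyRange5_nil _ _ (by simp)]
      simp [pvALoop, pvBRec]
  | succ n ih =>
      intro t pre ht counter num
      by_cases htnil : t = []
      · subst htnil
        rw [pyRange5_nil _ _ (by simp)]
        simp [pvALoop, pvBRec]
      · have hlen : 0 < t.length :=
          Nat.pos_of_ne_zero (fun h0 => htnil (List.eq_nil_of_length_eq_zero h0))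
        rw [pyRange5_cons _ _ (by exact_mod_cast Nat.lt_add_of_pos_right hlen)]
        have hgroupA : PySem.List.slice (pre ++ t) (some (pre.length : Int))
            (some ((pre.length : Int) + 5)) = t.take 5 := by
          have h5 : ((pre.length : Int) + 5) = ((pre.length : Int) + ((5:Nat) : Int)) := by norm_num
          rw [h5, PySem.List.slice_natCast_add, List.drop_append_of_le_length (le_refl _),
            List.drop_length, List.nil_append]
        have hB : pvBRec t =
            (if PySem.List.pyGet? (t.take 5) 0 = some '0'
              then ((1 : Int), PySem.List.slice (t.take 5) (some 1) none)
              else ((pvBRec (t.drop 5)).1 + 1,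
                PySem.List.slice (t.take 5) (some 1) none ++ (pvBRec (t.drop 5)).2)) := by
          rw [pvBRec, dif_neg htnil, take5_eq, drop5_eq]
        simp only [pvALoop, hgroupA]
        by_cases hz : PySem.List.pyGet? (t.take 5) 0 = some '0'
        · rw [hB, if_pos hz, if_pos hz]
        · rw [hB, if_neg hz, if_neg hz]
          by_cases h5 : 5 ≤ t.length
          · have this := ih (t.drop 5) (pre ++ t.take 5)
              (by simp; omega) (counter + 1)
              (num ++ PySem.List.slice (t.take 5) (some 1) none)
            have harr : (pre ++ t.take 5) ++ t.drop 5 = pre ++ t := by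
              rw [List.append_assoc, List.take_append_drop]
            have hlen' : (((pre ++ t.take 5).length : Nat) : Int) = (pre.length : Int) + 5 := by
              simp [List.length_append, List.length_take]
              omega
            rw [harr, hlen'] at this
            have hstop : ((pre.length : Int) + 5) + (((t.drop 5).length : Nat) : Int)
                = (pre.length : Int) + (t.length : Int) := by
              simp [List.length_drop]
              omega
            rw [hstop] at this
            rw [this, Prod.mk.injEq]
            exact ⟨by ring, by simp⟩
          · have hA : PySem.List.pyRange ((pre.length : Int) + 5)
                ((pre.length : Int) + (t.length : Int)) 5 = [] :=
              pyRange5_nil _ _ (by omega)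
            have hBnil : pvBRec (t.drop 5) = (0, []) := by
              have hd : t.drop 5 = [] := List.drop_eq_nil_of_le (by omega)
              rw [hd, pvBRec]; simp
            rw [hA, hBnil]
            simp [pvALoop]

-- the stride-5 selection binstr[0::5], as a recursion
def strideRec : List Char → List Char
  | [] => []
  | c :: cs => c :: strideRec (cs.drop 4)
termination_by s => s.length
decreasing_by simp only [List.length_cons, List.length_drop]; omega

lemma strideRec_drop (c : Char) (cs : List Char) :
    strideRec (c :: cs) = c :: strideRec ((c :: cs).drop 5) := by
  rw [strideRec]
  simp [List.drop_succ_cons]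

lemma slice?_stride5_closed (s : List Char) :
    PySem.List.slice? s (some 0) none 5 =
      some (List.filterMap (fun k : Nat => s[5 * k]?)
        (List.range ((s.length + 4) / 5))) := by
  rw [PySem.List.slice?, if_neg (by norm_num : ¬ (5:Int) = 0)]
  rw [show PySem.List.sliceIndices s.length (some 0) none 5 = (0, (s.length : Int), 5) by
    simp [PySem.List.sliceIndices]]
  dsimp only
  congr 1
  congr 1
  · funext k
    congr 1
    omega
  · congr 1
    by_cases h : 0 < s.length
    · rw [if_pos (by norm_num), if_pos (by exact_mod_cast h)]
      omega
    · rw [if_pos (by norm_num), if_neg (by exact_mod_cast h)]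
      omega

lemma slice?_stride5 :
    ∀ fuel (s : List Char), s.length ≤ fuel →
      PySem.List.slice? s (some 0) none 5 = some (strideRec s) := by
  intro fuel
  induction fuel with
  | zero =>
      intro s hs
      have h0 : s = [] := List.eq_nil_of_length_eq_zero (Nat.le_zero.mp hs)
      subst h0
      rw [slice?_stride5_closed, strideRec]
      simp
  | succ n ih =>
      intro s hs
      match s with
      | [] =>
        rw [slice?_stride5_closed, strideRec]
        simp
      | c :: cs =>
        rw [slice?_stride5_closed]
        have hcnt : ((c :: cs).length + 4) / 5 = (((c :: cs).drop 5).length + 4) / 5 + 1 := by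
          simp only [List.length_cons, List.length_drop]
          omega
        rw [hcnt, List.range_succ_eq_map, List.filterMap_cons, List.filterMap_map]
        have hf0 : (c :: cs)[5 * 0]? = some c := by norm_num
        simp only [hf0]
        have hrest : List.filterMap ((fun k : Nat => (c :: cs)[5 * k]?) ∘ Nat.succ)
            (List.range ((((c :: cs).drop 5).length + 4) / 5))
            = List.filterMap (fun k : Nat => ((c :: cs).drop 5)[5 * k]?)
            (List.range ((((c :: cs).drop 5).length + 4) / 5)) := by
          refine List.filterMap_congr fun k _ => ?_
          simp only [Function.comp_apply, List.getElem?_drop]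
          congr 1
          omega
        rw [hrest, show List.filterMap (fun k : Nat => ((c :: cs).drop 5)[5 * k]?)
            (List.range ((((c :: cs).drop 5).length + 4) / 5)) = strideRec ((c :: cs).drop 5) by
          have hIH := ih ((c :: cs).drop 5) (by simp only [List.length_drop, List.length_cons] at hs ⊢; omega)
          rw [slice?_stride5_closed, Option.some_inj] at hIH
          exact hIH]
        rw [strideRec_drop]

-- find on a cons, for a single-character needle
lemma find_single_cons (x c : Char) (cs : List Char) :
    PySem.Chars.find (c :: cs) [x]
      = if c = x then 0
        else (if PySem.Chars.find cs [x] = -1 then -1 else PySem.Chars.find cs [x] + 1) := by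
  by_cases hc : c = x
  · subst hc
    rw [if_pos rfl]
    have hinf : [c] <:+: (c :: cs) := (List.singleton_infix_iff c _).mpr (List.mem_cons_self)
    have h0 : 0 ≤ PySem.Chars.find (c :: cs) [c] := (PySem.Chars.find_nonneg_iff _ _).mpr hinf
    have hspec := PySem.Chars.find_spec h0
    by_contra hne
    have hpos : 0 < (PySem.Chars.find (c :: cs) [c]).toNat := by omega
    exact hspec.2 0 hpos ⟨cs, rfl⟩
  · rw [if_neg hc]
    by_cases hm : PySem.Chars.find cs [x] = -1
    · rw [if_pos hm]
      refine (PySem.Chars.find_eq_neg_one_iff _ _).mpr ?_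
      intro hinf
      rcases List.mem_cons.mp ((List.singleton_infix_iff x _).mp hinf) with h | h
      · exact hc h.symm
      · exact ((PySem.Chars.find_eq_neg_one_iff _ _).mp hm) ((List.singleton_infix_iff x _).mpr h)
    · rw [if_neg hm]
      have hj0 : 0 ≤ PySem.Chars.find cs [x] := by
        have := PySem.Chars.neg_one_le_find cs [x]
        omega
      have hspec := PySem.Chars.find_spec hj0
      have hinf : [x] <:+: (c :: cs) := (List.singleton_infix_iff x _).mpr
        (List.mem_cons_of_mem c ((List.singleton_infix_iff x _).mp ((PySem.Chars.find_nonneg_iff _ _).mp hj0)))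
      have h0 : 0 ≤ PySem.Chars.find (c :: cs) [x] := (PySem.Chars.find_nonneg_iff _ _).mpr hinf
      have hspec' := PySem.Chars.find_spec h0
      set m := (PySem.Chars.find (c :: cs) [x]).toNat with hm_def
      set j := (PySem.Chars.find cs [x]).toNat with hj_def
      have hmne0 : m ≠ 0 := by
        intro h0m
        have := hspec'.1
        rw [h0m, List.drop_zero] at this
        rcases List.cons_prefix_cons.mp this with ⟨hxc, -⟩
        exact hc hxc.symm
      have hdropm : List.drop m (c :: cs) = List.drop (m - 1) cs := by
        rcases Nat.exists_eq_succ_of_ne_zero hmne0 with ⟨k, hk⟩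
        rw [hk, List.drop_succ_cons]
        norm_num
      have hge : j ≤ m - 1 := by
        by_contra hlt
        exact hspec.2 (m - 1) (by omega) (hdropm ▸ hspec'.1)
      have hle : m ≤ j + 1 := by
        by_contra hlt
        exact hspec'.2 (j + 1) (by omega) (by simpa [List.drop_succ_cons] using hspec.1)
      have hmj : m = j + 1 := by omega
      omega

-- the count of consumed groups, as a Nat
def cntN : List Char → Nat
  | [] => 0
  | c :: cs => if c = '0' then 1 else cntN (cs.drop 4) + 1
termination_by s => s.length
decreasing_by simp only [List.length_cons, List.length_drop]; omega

lemma cntN_drop (c : Char) (cs : List Char) :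
    cntN (c :: cs) = if c = '0' then 1 else cntN ((c :: cs).drop 5) + 1 := by
  rw [cntN]
  simp [List.drop_succ_cons]

-- B's count expression over the flags equals the recursive count
lemma count_eq_cntN :
    ∀ fuel (s : List Char), s.length ≤ fuel →
      (if PySem.Chars.find (strideRec s) ['0'] ≠ -1
        then PySem.Chars.find (strideRec s) ['0'] + 1
        else ((strideRec s).length : Int)) = (cntN s : Int) := by
  intro fuel
  induction fuel with
  | zero =>
      intro s hs
      have h0 : s = [] := List.eq_nil_of_length_eq_zero (Nat.le_zero.mp hs)
      subst h0
      rw [strideRec, cntN]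
      decide
  | succ n ih =>
      intro s hs
      match s with
      | [] =>
        rw [strideRec, cntN]
        decide
      | c :: cs =>
        have hIH := ih ((c :: cs).drop 5) (by simp only [List.length_drop, List.length_cons] at hs ⊢; omega)
        rw [strideRec_drop, find_single_cons, cntN_drop]
        by_cases hc : c = '0'
        · rw [if_pos hc, if_pos hc]
          norm_num
        · rw [if_neg hc, if_neg hc]
          by_cases hm : PySem.Chars.find (strideRec ((c :: cs).drop 5)) ['0'] = -1
          · rw [if_pos hm, if_neg (by omega : ¬ ((-1:Int) ≠ -1))]
            rw [if_neg (by omega : ¬ PySem.Chars.find (strideRec ((c :: cs).drop 5)) ['0'] ≠ -1)] at hIH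
            simp only [List.length_cons]
            push_cast
            omega
          · rw [if_neg hm]
            rw [if_pos (by
              have := PySem.Chars.neg_one_le_find (strideRec ((c :: cs).drop 5)) ['0']
              omega : PySem.Chars.find (strideRec ((c :: cs).drop 5)) ['0'] + 1 ≠ -1)]
            rw [if_pos hm] at hIH
            push_cast
            omega

-- the joined payload equals the recursion's accumulated bits
lemma payload_eq_rec :
    ∀ fuel (s : List Char), s.length ≤ fuel →
      (List.map (fun k => (s.drop (5 * k + 1)).take 4) (List.range (cntN s))).flatten
        = (pvBRec s).2 := by
  intro fuel
  induction fuel with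
  | zero =>
      intro s hs
      have h0 : s = [] := List.eq_nil_of_length_eq_zero (Nat.le_zero.mp hs)
      subst h0
      rw [pvBRec]
      simp [cntN]
  | succ n ih =>
      intro s hs
      match s with
      | [] =>
        rw [pvBRec]
        simp [cntN]
      | c :: cs =>
        have hB : pvBRec (c :: cs) =
            (if PySem.List.pyGet? ((c :: cs).take 5) 0 = some '0'
              then ((1 : Int), PySem.List.slice ((c :: cs).take 5) (some 1) none)
              else ((pvBRec ((c :: cs).drop 5)).1 + 1,
                PySem.List.slice ((c :: cs).take 5) (some 1) none ++ (pvBRec ((c :: cs).drop 5)).2)) := by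
          rw [pvBRec, dif_neg (by simp), take5_eq, drop5_eq]
        have htail : PySem.List.slice ((c :: cs).take 5) (some 1) none = cs.take 4 := by
          rw [PySem.List.slice_from _ (by norm_num : (0:Int) ≤ 1)]
          simp [List.take_succ_cons]
        have hz : PySem.List.pyGet? ((c :: cs).take 5) 0 = some c := by
          simp [List.take_succ_cons]
        rw [cntN_drop, hB, hz]
        by_cases hc : c = '0'
        · subst hc
          rw [if_pos rfl, if_pos rfl, htail]
          simp
        · rw [if_neg hc, if_neg (by simp [hc]), List.range_succ_eq_map, List.map_cons,
            List.map_map, List.flatten_cons, htail]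
          have hshift : List.map ((fun k => (List.drop (5 * k + 1) (c :: cs)).take 4) ∘ Nat.succ)
              (List.range (cntN ((c :: cs).drop 5)))
              = List.map (fun k => (List.drop (5 * k + 1) ((c :: cs).drop 5)).take 4)
              (List.range (cntN ((c :: cs).drop 5))) := by
            refine List.map_congr_left fun k _ => ?_
            simp only [Function.comp_apply, List.drop_drop]
            congr 2
            omega
          rw [hshift, ih ((c :: cs).drop 5) (by simp only [List.length_drop, List.length_cons] at hs ⊢; omega)]
          simp

-- B's Int-indexed slice comprehension is the Nat-indexed one above
lemma payload_conv (s : List Char) (m : Nat) :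
    (List.map (fun k => PySem.List.slice s (some (5 * k + 1)) (some (5 * k + 5)))
        (PySem.List.pyRange 0 (m : Int) 1)).flatten
      = (List.map (fun k => (s.drop (5 * k + 1)).take 4) (List.range m)).flatten := by
  rw [PySem.List.pyRange_zero_natCast, List.map_map]
  congr 1
  refine List.map_congr_left fun k _ => ?_
  simp only [Function.comp_apply]
  have h1 : (5 : Int) * (k : Int) + 1 = ((5 * k + 1 : Nat) : Int) := by push_cast; ring
  have h2 : (5 : Int) * (k : Int) + 5 = ((5 * k + 1 : Nat) : Int) + ((4 : Nat) : Int) := by push_cast; ring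
  rw [h1, h2, PySem.List.slice_natCast_add]

-- the recursive count is the loop's counter
lemma cntN_eq_fst :
    ∀ fuel (s : List Char), s.length ≤ fuel → (cntN s : Int) = (pvBRec s).1 := by
  intro fuel
  induction fuel with
  | zero =>
      intro s hs
      have h0 : s = [] := List.eq_nil_of_length_eq_zero (Nat.le_zero.mp hs)
      subst h0
      rw [pvBRec]
      simp [cntN]
  | succ n ih =>
      intro s hs
      match s with
      | [] => rw [pvBRec]; simp [cntN]
      | c :: cs =>
        have hB : pvBRec (c :: cs) =
            (if PySem.List.pyGet? ((c :: cs).take 5) 0 = some '0'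
              then ((1 : Int), PySem.List.slice ((c :: cs).take 5) (some 1) none)
              else ((pvBRec ((c :: cs).drop 5)).1 + 1,
                PySem.List.slice ((c :: cs).take 5) (some 1) none ++ (pvBRec ((c :: cs).drop 5)).2)) := by
          rw [pvBRec, dif_neg (by simp), take5_eq, drop5_eq]
        have hz : PySem.List.pyGet? ((c :: cs).take 5) 0 = some c := by
          simp [List.take_succ_cons]
        rw [cntN_drop, hB, hz]
        by_cases hc : c = '0'
        · subst hc; simp
        · rw [if_neg hc, if_neg (by simp [hc])]
          have := ih ((c :: cs).drop 5) (by simp only [List.length_drop, List.length_cons] at hs ⊢; omega)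
          push_cast
          omega

-- ===== VERDICT (by name: the statement is the Claim_ definition above) =====
theorem compute_literal_value_spec : Claim_equal_compute_literal_value := by
  intro binstr _
  unfold Spec_compute_literal_value
  simp only [compute_literal_value, compute_literal_value_alt]
  have hA := loop_eq_rec binstr.toList.length binstr.toList [] (le_refl _) 0 []
  simp only [List.nil_append, List.length_nil, Nat.cast_zero, zero_add] at hA
  rw [hA]
  rw [slice?_stride5 binstr.toList.length binstr.toList (le_refl _)]
  simp only [Option.getD_some]
  rw [count_eq_cntN binstr.toList.length binstr.toList (le_refl _),
    payload_conv binstr.toList (cntN binstr.toList),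
    payload_eq_rec binstr.toList.length binstr.toList (le_refl _),
    cntN_eq_fst binstr.toList.length binstr.toList (le_refl _)]
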